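-- pv_equiv track=rewrite | github.com/Hojung-Jeong/Silver-Bullet-Encryption-Tool | silver_bullet/bitwise.py | nand
-- ===== SOURCE A (Python) =====
-- def nand(int1, int2):
-- 	anded=int1&int2
-- 	banded=list(bin(anded))[2:]
-- 	bint1_len=len(bin(int1)[2:])
-- 	bint2_len=len(bin(int2)[2:])
--
-- 	if bint1_len>bint2_len:
-- 		total_len=bint1_len
-- 	else:
-- 		total_len=bint2_len
--
-- 	holder=['1' for addit in range(total_len-len(banded))]
--
-- 	for element in banded:
-- 		if element=='1':
-- 			holder.append('0')
-- 		elif element=='0':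
-- 			holder.append('1')
--
-- 	return int(''.join(holder), 2)
-- ===== SOURCE B (Python) =====
-- def nand(int1, int2):
-- 	if int1 < 0 or int2 < 0:
-- 		raise ValueError("nand requires nonnegative operands")
-- 	total_len = max(int1.bit_length(), int2.bit_length(), 1)
-- 	return 2 ** total_len - 1 - (int1 & int2)
-- ===== Notes on version B (the rewrite author's own statement) =====
-- stated objective: simpler
-- what changed: Replaces the binary-string conversion, padding list and per-bit inversion loop with one arithmetic expression 2**max(bit_length,1) - 1 - (int1 & int2); Pre_ excludes negative operands, on which bin()'s '-0b' prefix leaks a stray 'b' into A's digit list so the returned number is an accident of string slicing, and B instead raises ValueError there.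
-- outside the precondition, e.g. on nand(-3, 3): A returns 6, B raises ValueError; on nand(-1, -2): A returns 1, B raises ValueError
import Mathlib
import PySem

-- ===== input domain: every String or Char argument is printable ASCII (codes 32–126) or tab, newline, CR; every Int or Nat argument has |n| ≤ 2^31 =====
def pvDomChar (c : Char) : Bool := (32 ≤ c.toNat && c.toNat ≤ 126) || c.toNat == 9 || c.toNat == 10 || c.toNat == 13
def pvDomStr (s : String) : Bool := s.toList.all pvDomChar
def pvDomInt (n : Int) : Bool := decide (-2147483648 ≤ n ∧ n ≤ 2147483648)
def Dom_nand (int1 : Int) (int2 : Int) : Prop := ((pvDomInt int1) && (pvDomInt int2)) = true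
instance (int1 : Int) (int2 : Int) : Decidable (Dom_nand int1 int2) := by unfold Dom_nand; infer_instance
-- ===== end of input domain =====

-- B replaces A's binary-string conversion, padding list and per-bit inversion loop with one
-- arithmetic expression; on negative operands (outside Pre_) B raises ValueError instead of
-- returning A's string-slicing accident.

-- ===== PORT A =====

-- digit characters of bin(n) after the leading '0b' for positive n (MSB first); [] for 0
def natBits (n : Nat) : List Char :=
  if h : n = 0 then [] else natBits (n / 2) ++ [if n % 2 = 1 then '1' else '0']
decreasing_by exact Nat.div_lt_self (Nat.pos_of_ne_zero h) one_lt_two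

-- bin(n)[2:] as a list of characters: for n ≥ 0 the binary digits ('0' for zero);
-- for n < 0, bin(n) = '-0b…', so bin(n)[2:] is 'b' followed by the digits of |n| — exact
def pyBinTail (n : Int) : List Char :=
  if n < 0 then 'b' :: (if n.natAbs = 0 then ['0'] else natBits n.natAbs)
  else if n.toNat = 0 then ['0'] else natBits n.toNat

-- int(''.join(l), 2): base-2 parse; every list A feeds it is nonempty with all characters
-- '0'/'1', where this foldl is exact
def parseBin (l : List Char) : Int :=
  l.foldl (fun acc c => 2 * acc + (if c = '1' then 1 else 0)) 0

def nand (int1 : Int) (int2 : Int) : Int :=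
  let anded := Int.land int1 int2          -- int1 & int2
  let banded := pyBinTail anded            -- list(bin(anded))[2:]
  let bint1_len : Int := (pyBinTail int1).length
  let bint2_len : Int := (pyBinTail int2).length
  let total_len : Int := if bint1_len > bint2_len then bint1_len else bint2_len
  let holder := (PySem.List.pyRange 0 (total_len - banded.length) 1).map (fun _ => '1')
  let holder := banded.foldl (fun h element =>
    if element = '1' then h ++ ['0']
    else if element = '0' then h ++ ['1']
    else h) holder
  parseBin holder

-- ===== PORT B =====

-- n.bit_length() for n ≥ 0 — exact
def bitLen (n : Nat) : Nat :=
  if h : n = 0 then 0 else bitLen (n / 2) + 1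
decreasing_by exact Nat.div_lt_self (Nat.pos_of_ne_zero h) one_lt_two

def nand_alt (int1 : Int) (int2 : Int) : Int :=
  if int1 < 0 ∨ int2 < 0 then 0  -- Python B raises ValueError here (outside Pre_nand)
  else
    let total_len := max (max (bitLen int1.toNat) (bitLen int2.toNat)) 1
    2 ^ total_len - 1 - Int.land int1 int2

-- ===== PRECONDITION & SPEC =====
-- Pre_ excludes negative operands, on which bin()'s '-0b' prefix leaks a stray 'b' into A's
-- digit list so A's returned number is an accident of string slicing; B raises ValueError there.
def Pre_nand (int1 : Int) (int2 : Int) : Prop := 0 ≤ int1 ∧ 0 ≤ int2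
instance (int1 : Int) (int2 : Int) : Decidable (Pre_nand int1 int2) := by unfold Pre_nand; infer_instance

def pvWitness_nand : Int × Int := (5, 3)

def Spec_nand (int1 : Int) (int2 : Int) (out : Int) : Prop := out = nand_alt int1 int2
instance (int1 : Int) (int2 : Int) (out : Int) : Decidable (Spec_nand int1 int2 out) := by unfold Spec_nand; infer_instance

-- ===== CLAIM (what is proved, stated in full; the proofs are below) =====
def Claim_equal_nand : Prop := ∀ (int1 : Int) (int2 : Int), Dom_nand int1 int2 → Pre_nand int1 int2 → Spec_nand int1 int2 (nand int1 int2)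

-- ===== LEMMAS AND PROOFS =====

-- every element of natBits n is '0' or '1'
theorem natBits_mem (n : Nat) : ∀ c ∈ natBits n, c = '0' ∨ c = '1' := by
  induction n using Nat.strong_induction_on with
  | _ n ih =>
    intro c hc
    rw [natBits] at hc
    split at hc
    · simp at hc
    · rename_i h
      rcases List.mem_append.1 hc with h1 | h1
      · exact ih (n / 2) (Nat.div_lt_self (Nat.pos_of_ne_zero h) one_lt_two) c h1
      · simp at h1; subst h1; split <;> simp

theorem natBits_length (n : Nat) : (natBits n).length = bitLen n := by
  induction n using Nat.strong_induction_on with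
  | _ n ih =>
    rw [natBits, bitLen]
    split
    · rfl
    · rename_i h
      simp [ih (n / 2) (Nat.div_lt_self (Nat.pos_of_ne_zero h) one_lt_two)]

theorem bitLen_pos (n : Nat) (h : n ≠ 0) : 1 ≤ bitLen n := by
  rw [bitLen, dif_neg h]; omega

-- n < 2 ^ bitLen n
theorem lt_two_pow_bitLen (n : Nat) : n < 2 ^ bitLen n := by
  induction n using Nat.strong_induction_on with
  | _ n ih =>
    rw [bitLen]
    split
    · omega
    · rename_i h
      have h1 := ih (n / 2) (Nat.div_lt_self (Nat.pos_of_ne_zero h) one_lt_two)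
      have h2 : 2 ^ (bitLen (n / 2) + 1) = 2 * 2 ^ bitLen (n / 2) := by ring
      omega

-- n < 2 ^ k → bitLen n ≤ k
theorem bitLen_le_of_lt (n k : Nat) (h : n < 2 ^ k) : bitLen n ≤ k := by
  induction n using Nat.strong_induction_on generalizing k with
  | _ n ih =>
    rw [bitLen]
    split
    · omega
    · rename_i h0
      have hk : 1 ≤ k := by
        by_contra hk
        have hk0 : k = 0 := by omega
        subst hk0
        simp at h
        omega
      have hpow : 2 ^ k = 2 * 2 ^ (k - 1) := by
        conv_lhs => rw [show k = (k - 1) + 1 by omega]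
        ring
      have hlt : n / 2 < 2 ^ (k - 1) := by omega
      have := ih (n / 2) (Nat.div_lt_self (Nat.pos_of_ne_zero h0) one_lt_two) (k - 1) hlt
      omega

theorem bitLen_mono {m n : Nat} (h : m ≤ n) : bitLen m ≤ bitLen n :=
  bitLen_le_of_lt m (bitLen n) (Nat.lt_of_le_of_lt h (lt_two_pow_bitLen n))

-- the flip loop appends one flipped digit per element when every element is '0' or '1'
theorem foldl_flip (l : List Char) (h0 : List Char)
    (hl : ∀ c ∈ l, c = '0' ∨ c = '1') :
    l.foldl (fun h element =>
      if element = '1' then h ++ ['0']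
      else if element = '0' then h ++ ['1']
      else h) h0
    = h0 ++ l.map (fun c => if c = '1' then '0' else '1') := by
  induction l generalizing h0 with
  | nil => simp
  | cons c l ih =>
    have hc := hl c (by simp)
    have hrest : ∀ c ∈ l, c = '0' ∨ c = '1' := fun x hx => hl x (by simp [hx])
    rcases hc with h | h <;> subst h <;>
      simp [List.foldl_cons, ih _ hrest, List.append_assoc]

-- foldl form of parseBin with a general accumulator
theorem parse_foldl (l : List Char) (acc : Int) :
    l.foldl (fun acc c => 2 * acc + (if c = '1' then 1 else 0)) acc
    = acc * 2 ^ l.length + parseBin l := by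
  induction l generalizing acc with
  | nil => simp [parseBin]
  | cons c l ih =>
    simp only [List.foldl_cons, List.length_cons, parseBin]
    rw [ih, ih (2 * 0 + (if c = '1' then 1 else 0))]
    ring

theorem parseBin_append (p q : List Char) :
    parseBin (p ++ q) = parseBin p * 2 ^ q.length + parseBin q := by
  unfold parseBin
  rw [List.foldl_append, parse_foldl]
  rfl

theorem parseBin_replicate (k : Nat) : parseBin (List.replicate k '1') = 2 ^ k - 1 := by
  induction k with
  | zero => simp [parseBin]
  | succ k ih =>
    rw [List.replicate_succ', parseBin_append, ih]
    have h1 : parseBin ['1'] = 1 := by decide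
    have h2 : (['1'] : List Char).length = 1 := rfl
    rw [h1, h2, pow_succ]
    ring

-- the flipped digits of n parse to 2^bitLen n - 1 - n
theorem parseBin_flip_natBits (n : Nat) :
    parseBin ((natBits n).map (fun c => if c = '1' then '0' else '1'))
      = 2 ^ bitLen n - 1 - n := by
  induction n using Nat.strong_induction_on with
  | _ n ih =>
    rw [natBits, bitLen]
    split
    · rename_i h; subst h; simp [parseBin]
    · rename_i h
      rw [List.map_append, parseBin_append]
      have hrec := ih (n / 2) (Nat.div_lt_self (Nat.pos_of_ne_zero h) one_lt_two)
      have hcast : (n : Int) = 2 * ((n / 2 : Nat) : Int) + ((n % 2 : Nat) : Int) := by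
        push_cast
        omega
      rcases Nat.mod_two_eq_zero_or_one n with h2 | h2 <;>
      · rw [h2] at hcast
        simp only [h2] at *
        norm_num
        rw [hrec]
        have hone : parseBin ['1'] = 1 := by decide
        have hzero : parseBin ['0'] = 0 := by decide
        simp only [hone, hzero, pow_succ]
        push_cast at hcast ⊢
        nlinarith [hcast]

-- pyBinTail on a nonnegative Int is the digit list of its toNat
theorem pyBinTail_nonneg (n : Int) (hn : 0 ≤ n) :
    pyBinTail n = (if n.toNat = 0 then ['0'] else natBits n.toNat) := by
  unfold pyBinTail
  rw [if_neg (by omega)]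

theorem length_pyBinTail_nonneg (n : Int) (hn : 0 ≤ n) :
    (pyBinTail n).length = max (bitLen n.toNat) 1 := by
  rw [pyBinTail_nonneg n hn]
  split
  · rename_i h
    simp [h, bitLen]
  · rename_i h
    rw [natBits_length]
    have := bitLen_pos n.toNat h
    omega

-- length of the digit list of d
theorem length_digits (d : Nat) :
    (if d = 0 then ['0'] else natBits d).length = max (bitLen d) 1 := by
  split
  · rename_i h; simp [h, bitLen]
  · rename_i h
    rw [natBits_length]
    have := bitLen_pos d h
    omega

-- the flipped digit list of d parses to 2^(max (bitLen d) 1) - 1 - d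
theorem parse_flip_digits (d : Nat) :
    parseBin ((if d = 0 then ['0'] else natBits d).map (fun c => if c = '1' then '0' else '1'))
      = 2 ^ max (bitLen d) 1 - 1 - (d : Int) := by
  split
  · rename_i h
    subst h
    simp [bitLen]
    decide
  · rename_i h
    rw [parseBin_flip_natBits, max_eq_left (bitLen_pos d h)]

-- the padding comprehension is a replicate
theorem pad_replicate (k : Int) :
    (PySem.List.pyRange 0 k 1).map (fun _ => '1') = List.replicate k.toNat '1' := by
  rw [PySem.List.pyRange_one]
  simp [List.map_map, List.eq_replicate_iff]

-- A's value at nonnegative operands, in closed form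
theorem nand_natCast (a b : Nat) :
    nand (a : Int) (b : Int)
      = 2 ^ max (max (bitLen a) (bitLen b)) 1 - 1 - ((a &&& b : Nat) : Int) := by
  simp only [nand]
  have hland : Int.land (a : Int) (b : Int) = ((a &&& b : Nat) : Int) := rfl
  rw [hland]
  rw [pyBinTail_nonneg ((a &&& b : Nat) : Int) (Int.natCast_nonneg _)]
  rw [length_pyBinTail_nonneg _ (Int.natCast_nonneg a),
      length_pyBinTail_nonneg _ (Int.natCast_nonneg b)]
  simp only [Int.toNat_natCast]
  set d : Nat := a &&& b with hd
  set L : Nat := max (max (bitLen a) (bitLen b)) 1 with hL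
  have hif : (if ((max (bitLen a) 1 : Nat) : Int) > ((max (bitLen b) 1 : Nat) : Int)
      then ((max (bitLen a) 1 : Nat) : Int) else ((max (bitLen b) 1 : Nat) : Int))
      = (L : Int) := by
    split <;> (rename_i hc; push_cast at hc ⊢; omega)
  rw [hif, length_digits, foldl_flip _ _ (by
      split
      · rename_i h0; intro c hc; simp at hc; subst hc; left; rfl
      · exact natBits_mem d)]
  rw [pad_replicate, parseBin_append, parseBin_replicate, parse_flip_digits]
  rw [List.length_map, length_digits]
  set M : Nat := max (bitLen d) 1 with hM
  have hdla : d ≤ a := Nat.and_le_left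
  have hML : M ≤ L := by
    have := bitLen_mono hdla
    omega
  have hk : ((L : Int) - (M : Int)).toNat = L - M := by omega
  rw [hk]
  have hLM : L - M + M = L := by omega
  calc (2 ^ (L - M) - 1) * 2 ^ M + (2 ^ M - 1 - (d : Int))
      = 2 ^ (L - M + M) - 1 - (d : Int) := by rw [pow_add]; ring
    _ = 2 ^ L - 1 - (d : Int) := by rw [hLM]

-- B's value at nonnegative operands, in the same closed form
theorem nand_alt_natCast (a b : Nat) :
    nand_alt (a : Int) (b : Int)
      = 2 ^ max (max (bitLen a) (bitLen b)) 1 - 1 - ((a &&& b : Nat) : Int) := by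
  simp only [nand_alt]
  rw [if_neg (by push_cast; omega)]
  have hland : Int.land (a : Int) (b : Int) = ((a &&& b : Nat) : Int) := rfl
  rw [hland]
  simp only [Int.toNat_natCast]

-- ===== VERDICT (by name: the statement is the Claim_ definition above) =====
theorem nand_spec : Claim_equal_nand := by
  intro int1 int2 _hdom hpre
  obtain ⟨h1, h2⟩ := hpre
  lift int1 to ℕ using h1 with a
  lift int2 to ℕ using h2 with b
  unfold Spec_nand
  rw [nand_natCast, nand_alt_natCast]
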